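-- pv_equiv track=rewrite | github.com/ArjunDivecha/California-Law-Chatbot | scripts/process_ceb_pdfs.py | extract_metadata_from_filename
-- ===== SOURCE A (Python) =====
-- from typing import List, Dict, Any, Optional
--
-- def extract_metadata_from_filename(filename: str) -> Dict[str, str]:
--     """
--     Extract title and section from CEB PDF filename.
--
--     Example filename:
--     "administering_a_single_person_trust_after_settlors_death_0011_iii_conducting_first_meeting_with_client.pdf"
--
--     Returns:
--         {
--             "title": "Administering a Single Person Trust After Settlor's Death",
--             "section": "III. Conducting First Meeting with Client"
--         }
--     """
--     # Remove .pdf extension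
--     name = filename.replace('.pdf', '')
--
--     # Split by underscores
--     parts = name.split('_')
--
--     # Find the numeric separator (e.g., "0011")
--     separator_idx = None
--     for i, part in enumerate(parts):
--         if part.isdigit() and len(part) == 4:
--             separator_idx = i
--             break
--
--     if separator_idx is None:
--         # No separator found, use whole filename as title
--         title = ' '.join(parts).title()
--         return {"title": title, "section": ""}
--
--     # Title is before separator
--     title_parts = parts[:separator_idx]
--     title = ' '.join(title_parts).replace('_', ' ').title()
--
--     # Section is after separator
--     section_parts = parts[separator_idx + 1:]
--     section = ' '.join(section_parts).replace('_', ' ').title()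
--
--     return {"title": title, "section": section}
-- ===== SOURCE B (Python) =====
-- def extract_metadata_from_filename(filename):
--     """Character-level scan: locate the boundary-anchored 4-digit run directly in
--     the string and slice around it; no token list is ever built."""
--     name = filename.replace('.pdf', '')
--     n = len(name)
--     sep = None
--     for i in range(n - 3):
--         if ((i == 0 or name[i - 1] == '_')
--                 and name[i:i + 4].isdigit()
--                 and (i + 4 == n or name[i + 4] == '_')):
--             sep = i
--             break
--     if sep is None:
--         return {"title": name.replace('_', ' ').title(), "section": ""}
--     title = name[:sep - 1].replace('_', ' ').title() if sep > 0 else ""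
--     section = name[sep + 5:].replace('_', ' ').title() if sep + 4 < n else ""
--     return {"title": title, "section": section}
-- ===== Notes on version B (the rewrite author's own statement) =====
-- stated objective: alternative
-- what changed: B never builds the list of underscore-separated parts: it scans the string itself for the first boundary-anchored 4-digit run (preceded/followed by '_' or the string ends), then slices the raw string around it and maps underscores to spaces, where A splits on '_', enumerates parts to find the separator index, slices the parts list and rejoins with spaces.
import Mathlib
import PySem

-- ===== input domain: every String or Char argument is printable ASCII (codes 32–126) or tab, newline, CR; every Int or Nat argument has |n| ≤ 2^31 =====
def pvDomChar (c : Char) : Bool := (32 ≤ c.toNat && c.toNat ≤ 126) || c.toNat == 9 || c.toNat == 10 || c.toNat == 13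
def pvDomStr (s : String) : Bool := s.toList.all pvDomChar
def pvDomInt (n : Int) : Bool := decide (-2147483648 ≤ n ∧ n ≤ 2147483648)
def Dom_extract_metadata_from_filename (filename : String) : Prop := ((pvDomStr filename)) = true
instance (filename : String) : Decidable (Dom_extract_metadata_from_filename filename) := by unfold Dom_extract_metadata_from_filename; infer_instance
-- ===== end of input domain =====

-- B locates the boundary-anchored 4-digit run by a character-level scan of the raw string and
-- slices around it, instead of A's split-into-parts, enumerate, slice-and-rejoin; return values
-- proved equal on all of Dom (A is total, no side effects).

-- shared helper: Python str.title(), ported by hand (exact on the ASCII domain: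
-- a letter is uppercased when it follows a non-letter, lowercased otherwise)
def pyTitleGo : Bool → List Char → List Char
  | _, [] => []
  | prev, c :: rest =>
    if PySem.Chars.isalpha c then
      (if prev then PySem.Chars.lowerChar c else PySem.Chars.upperChar c) :: pyTitleGo true rest
    else c :: pyTitleGo false rest

def pyTitle (cs : List Char) : List Char := pyTitleGo false cs

-- ===== PORT A =====
-- for i, part in enumerate(parts): if part.isdigit() and len(part) == 4: separator_idx = i; break
def findSepA : List (List Char) → Nat → Option Nat
  | [], _ => none
  | p :: rest, i =>
    if PySem.Chars.strIsdigit p && p.length == 4 then some i else findSepA rest (i + 1)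

def extract_metadata_from_filename (filename : String) : List (String × String) :=
  let name := PySem.Chars.replace filename.toList ['.', 'p', 'd', 'f'] []
  let parts := PySem.Chars.splitOn name ['_']
  match findSepA parts 0 with
  | none =>
      [("title", String.ofList (pyTitle (PySem.Chars.join [' '] parts))), ("section", "")]
  | some i =>
      let title := pyTitle (PySem.Chars.replace (PySem.Chars.join [' '] (parts.take i)) ['_'] [' '])
      let sect := pyTitle (PySem.Chars.replace (PySem.Chars.join [' '] (parts.drop (i + 1))) ['_'] [' '])
      [("title", String.ofList title), ("section", String.ofList sect)]

-- ===== PORT B =====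
-- (i == 0 or name[i-1] == '_') and name[i:i+4].isdigit() and (i + 4 == n or name[i+4] == '_')
-- name[i-1]/name[i+4] are only reached with the index in range (short-circuit + loop bound),
-- so List.getD is exact; name[i:i+4] with 0 ≤ i is exactly (drop i).take 4
def sepOk (name : List Char) (i : Nat) : Bool :=
  (i == 0 || name.getD (i - 1) ' ' == '_')
    && PySem.Chars.strIsdigit ((name.drop i).take 4)
    && (i + 4 == name.length || name.getD (i + 4) ' ' == '_')

-- for i in range(n - 3): if <sepOk>: sep = i; break   (range(n-3) is empty when n < 4)
def findSepB (name : List Char) (i : Nat) : Option Nat :=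
  if _h : i < name.length - 3 then
    if sepOk name i then some i else findSepB name (i + 1)
  else none
termination_by name.length - 3 - i

def extract_metadata_from_filename_alt (filename : String) : List (String × String) :=
  let name := PySem.Chars.replace filename.toList ['.', 'p', 'd', 'f'] []
  match findSepB name 0 with
  | none =>
      [("title", String.ofList (pyTitle (PySem.Chars.replace name ['_'] [' ']))), ("section", "")]
  | some sep =>
      let title := if 0 < sep then
          String.ofList (pyTitle (PySem.Chars.replace (name.take (sep - 1)) ['_'] [' '])) else ""
      let sect := if sep + 4 < name.length then
          String.ofList (pyTitle (PySem.Chars.replace (name.drop (sep + 5)) ['_'] [' '])) else ""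
      [("title", title), ("section", sect)]

-- ===== PRECONDITION & SPEC =====
def Spec_extract_metadata_from_filename (filename : String) (out : List (String × String)) : Prop := out = extract_metadata_from_filename_alt filename
instance (filename : String) (out : List (String × String)) : Decidable (Spec_extract_metadata_from_filename filename out) := by unfold Spec_extract_metadata_from_filename; infer_instance

-- ===== CLAIM =====
def Claim_equal_extract_metadata_from_filename : Prop := ∀ (filename : String), Dom_extract_metadata_from_filename filename → Spec_extract_metadata_from_filename filename (extract_metadata_from_filename filename)

-- ===== LEMMAS AND PROOFS =====

-- the substitution '_' → ' ' as a character map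
def sub (c : Char) : Char := if c = '_' then ' ' else c

theorem sub_ne_underscore (c : Char) (h : c ≠ '_') : sub c = c := by
  simp [sub, h]

-- clean structural model of name.split('_')
def splitU : List Char → List (List Char)
  | [] => [[]]
  | c :: t =>
    if c = '_' then [] :: splitU t
    else match splitU t with
      | [] => [[c]]
      | p :: ps => (c :: p) :: ps

def prependU (x : List Char) : List (List Char) → List (List Char)
  | [] => [x]
  | p :: ps => (x ++ p) :: ps

theorem splitU_ne_nil (cs : List Char) : splitU cs ≠ [] := by
  cases cs with
  | nil => simp [splitU]
  | cons c t =>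
    simp only [splitU]
    split
    · simp
    · split <;> simp

theorem prependU_assoc (x y : List Char) (zs : List (List Char)) :
    prependU x (prependU y zs) = prependU (x ++ y) zs := by
  cases zs <;> simp [prependU]

theorem prependU_nil_splitU (l : List Char) : prependU [] (splitU l) = splitU l := by
  cases h : splitU l with
  | nil => exact absurd h (splitU_ne_nil l)
  | cons p ps => simp [prependU]

theorem splitOn_go_eq (fuel : Nat) (l cur : List Char) (acc : List (List Char))
    (hf : l.length < fuel) :
    PySem.Chars.splitOn.go ['_'] fuel l cur acc
      = acc.reverse ++ prependU cur.reverse (splitU l) := by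
  induction fuel generalizing l cur acc with
  | zero => omega
  | succ n ih =>
    cases l with
    | nil => simp [PySem.Chars.splitOn.go, splitU, prependU]
    | cons c t =>
      by_cases hc : c = '_'
      · subst hc
        have hp : List.isPrefixOf ['_'] ('_' :: t) = true := by simp [List.isPrefixOf]
        simp only [PySem.Chars.splitOn.go, hp, if_true, List.length_cons,
          List.length_nil, List.drop_succ_cons, List.drop_zero] at *
        rw [ih t [] (cur.reverse :: acc) (by omega)]
        simp only [splitU, List.reverse_cons, List.reverse_nil,
          List.append_assoc, List.singleton_append]
        cases h : splitU t with
        | nil => exact absurd h (splitU_ne_nil t)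
        | cons p ps => simp [prependU]
      · have hp : List.isPrefixOf ['_'] (c :: t) = false := by
          simp [List.isPrefixOf]; exact fun e => hc e.symm
        simp only [PySem.Chars.splitOn.go, hp, Bool.false_eq_true, if_false]
        rw [ih t (c :: cur) acc (by simp at hf ⊢; omega)]
        have : splitU (c :: t) = prependU [c] (splitU t) := by
          cases h : splitU t with
          | nil => exact absurd h (splitU_ne_nil t)
          | cons p ps => simp [splitU, hc, h, prependU]
        rw [this, prependU_assoc]
        simp

theorem splitOn_eq_splitU (cs : List Char) :
    PySem.Chars.splitOn cs ['_'] = splitU cs := by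
  unfold PySem.Chars.splitOn
  rw [splitOn_go_eq cs.length.succ cs [] [] (by omega)]
  simp [prependU_nil_splitU]

theorem replace_go_eq_map (fuel : Nat) (l acc : List Char) (hf : l.length ≤ fuel) :
    PySem.Chars.replace.go ['_'] [' '] fuel l acc = acc.reverse ++ l.map sub := by
  induction fuel generalizing l acc with
  | zero =>
    have : l = [] := by simpa using Nat.le_zero.mp hf
    subst this; rfl
  | succ n ih =>
    cases l with
    | nil => simp [PySem.Chars.replace.go]
    | cons c t =>
      by_cases hc : c = '_'
      · subst hc
        have hp : List.isPrefixOf ['_'] ('_' :: t) = true := by simp [List.isPrefixOf]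
        simp only [PySem.Chars.replace.go, hp, if_true, List.length_cons, List.length_nil,
          List.drop_succ_cons, List.drop_zero, List.reverse_cons, List.reverse_nil,
          List.nil_append, List.singleton_append]
        rw [ih t (' ' :: acc) (by simp at hf ⊢; omega)]
        simp [sub]
      · have hp : List.isPrefixOf ['_'] (c :: t) = false := by
          simp [List.isPrefixOf]; exact fun e => hc e.symm
        simp only [PySem.Chars.replace.go, hp, Bool.false_eq_true, if_false]
        rw [ih t (c :: acc) (by simp at hf ⊢; omega)]
        simp [sub_ne_underscore c hc]

theorem replace_eq_map (cs : List Char) :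
    PySem.Chars.replace cs ['_'] [' '] = cs.map sub := by
  unfold PySem.Chars.replace
  simpa using replace_go_eq_map cs.length cs [] le_rfl

theorem map_sub_id (cs : List Char) (h : '_' ∉ cs) : cs.map sub = cs := by
  induction cs with
  | nil => rfl
  | cons c t ih =>
    have h' : c ≠ '_' ∧ '_' ∉ t := by simpa [eq_comm] using h
    simp [sub_ne_underscore c h'.1, ih h'.2]

theorem map_sub_idem (cs : List Char) : (cs.map sub).map sub = cs.map sub := by
  rw [List.map_map]
  refine List.map_congr_left fun c _ => ?_
  by_cases h : c = '_' <;> simp [sub, h]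

theorem join_head_cons (c : Char) (p : List Char) (ps : List (List Char)) :
    PySem.Chars.join [' '] ((c :: p) :: ps) = c :: PySem.Chars.join [' '] (p :: ps) := by
  cases ps with
  | nil => simp [PySem.Chars.join, List.intercalate]
  | cons q qs => rw [PySem.Chars.join_cons_cons, PySem.Chars.join_cons_cons]; simp

theorem join_splitU (cs : List Char) :
    PySem.Chars.join [' '] (splitU cs) = cs.map sub := by
  induction cs with
  | nil => simp [splitU, PySem.Chars.join, List.intercalate]
  | cons c t ih =>
    by_cases hc : c = '_'
    · subst hc
      cases h : splitU t with
      | nil => exact absurd h (splitU_ne_nil t)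
      | cons p ps =>
        have hs : splitU ('_' :: t) = [] :: p :: ps := by simp [splitU, h]
        rw [hs, PySem.Chars.join_cons_cons, ← h, ih]
        simp [sub]
    · cases h : splitU t with
      | nil => exact absurd h (splitU_ne_nil t)
      | cons p ps =>
        have hs : splitU (c :: t) = (c :: p) :: ps := by simp [splitU, hc, h]
        rw [hs, join_head_cons, ← h, ih]
        simp [sub_ne_underscore c hc]

theorem splitU_no_sep (cs : List Char) (h : '_' ∉ cs) : splitU cs = [cs] := by
  induction cs with
  | nil => rfl
  | cons c t ih =>
    have h' : c ≠ '_' ∧ '_' ∉ t := by simpa [eq_comm] using h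
    simp [splitU, h'.1, ih h'.2]

theorem splitU_append (a r : List Char) (h : '_' ∉ a) :
    splitU (a ++ '_' :: r) = a :: splitU r := by
  induction a with
  | nil => simp [splitU]
  | cons c t ih =>
    have h' : c ≠ '_' ∧ '_' ∉ t := by simpa [eq_comm] using h
    simp [splitU, h'.1, ih h'.2]

theorem findSepA_shift (parts : List (List Char)) (i : Nat) :
    findSepA parts i = (findSepA parts 0).map (· + i) := by
  induction parts generalizing i with
  | nil => simp [findSepA]
  | cons p rest ih =>
    by_cases h : (PySem.Chars.strIsdigit p && p.length == 4) = true
    · simp [findSepA, h]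
    · simp only [findSepA, h, Bool.false_eq_true, if_false, ih (i + 1), ih 1]
      cases findSepA rest 0
      · simp
      · simp; omega

theorem findSepB_stop (cs : List Char) (i : Nat) (h : ¬ i < cs.length - 3) :
    findSepB cs i = none := by
  rw [findSepB]
  simp [h]

theorem findSepB_skip (cs : List Char) (i m : Nat) (him : i ≤ m)
    (h : ∀ j, i ≤ j → j < m → sepOk cs j = false) :
    findSepB cs i = findSepB cs m := by
  induction hk : m - i generalizing i with
  | zero =>
    have : i = m := by omega
    rw [this]
  | succ n ih =>
    have hlt : i < m := by omega
    by_cases hb : i < cs.length - 3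
    · rw [findSepB, dif_pos hb, if_neg (by simp [h i le_rfl hlt])]
      exact ih (i + 1) (by omega) (fun j h1 h2 => h j (by omega) h2) (by omega)
    · rw [findSepB_stop cs i hb, findSepB_stop cs m (by omega)]

theorem getD_shift (a r : List Char) (k : Nat) :
    (a ++ '_' :: r).getD (a.length + 1 + k) ' ' = r.getD k ' ' := by
  induction a with
  | nil =>
    simp only [List.nil_append, List.length_nil]
    have h : 0 + 1 + k = k + 1 := by omega
    rw [h, List.getD_cons_succ]
  | cons c a' ih =>
    simp only [List.cons_append, List.length_cons]
    have h : a'.length + 1 + 1 + k = (a'.length + 1 + k) + 1 := by omega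
    rw [h, List.getD_cons_succ, ih]

theorem getD_at_sep (a r : List Char) : (a ++ '_' :: r).getD a.length ' ' = '_' := by
  induction a with
  | nil => simp [List.getD]
  | cons c a' ih =>
    simp only [List.cons_append, List.length_cons]
    exact ih

theorem drop_shift (a r : List Char) (j : Nat) :
    (a ++ '_' :: r).drop (a.length + 1 + j) = r.drop j := by
  induction a with
  | nil =>
    have h : 0 + 1 + j = j + 1 := by omega
    simp [h]
  | cons c a' ih =>
    simp only [List.cons_append, List.length_cons]
    have h : a'.length + 1 + 1 + j = (a'.length + 1 + j) + 1 := by omega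
    rw [h, List.drop_succ_cons, ih]

theorem sepOk_shift (a r : List Char) (j : Nat) :
    sepOk (a ++ '_' :: r) (a.length + 1 + j) = sepOk r j := by
  unfold sepOk
  have hlen : ((a.length + 1 + j + 4 : Nat) == (a ++ '_' :: r).length)
      = ((j + 4 : Nat) == r.length) := by
    simp only [List.length_append, List.length_cons]
    by_cases h : j + 4 = r.length
    · simp [h]; omega
    · rw [beq_eq_false_iff_ne.mpr (by omega), beq_eq_false_iff_ne.mpr (by omega)]
  have hget4 : (a ++ '_' :: r).getD (a.length + 1 + j + 4) ' ' = r.getD (j + 4) ' ' := by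
    have h : a.length + 1 + j + 4 = a.length + 1 + (j + 4) := by omega
    rw [h, getD_shift]
  rw [drop_shift, hlen, hget4]
  congr 1
  -- first conjunct: the left-boundary test
  cases j with
  | zero =>
    have h1 : (a.length + 1 + 0 - 1) = a.length := by omega
    rw [h1, getD_at_sep]
    simp
  | succ k =>
    have h1 : a.length + 1 + (k + 1) - 1 = a.length + 1 + k := by omega
    rw [h1, getD_shift]
    rw [beq_eq_false_iff_ne.mpr (show a.length + 1 + (k + 1) ≠ 0 by omega),
        beq_eq_false_iff_ne.mpr (show k + 1 ≠ 0 by omega)]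
    have h2 : k + 1 - 1 = k := by omega
    rw [h2]

theorem findSepB_shift (a r : List Char) (j : Nat) :
    findSepB (a ++ '_' :: r) (a.length + 1 + j) = (findSepB r j).map (· + (a.length + 1)) := by
  induction hk : r.length - 3 - j generalizing j with
  | zero =>
    have h1 : ¬ j < r.length - 3 := by omega
    have h2 : ¬ a.length + 1 + j < (a ++ '_' :: r).length - 3 := by
      simp only [List.length_append, List.length_cons]; omega
    rw [findSepB_stop _ _ h2, findSepB_stop _ _ h1]
    rfl
  | succ n ih =>
    have h1 : j < r.length - 3 := by omega
    have h2 : a.length + 1 + j < (a ++ '_' :: r).length - 3 := by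
      simp only [List.length_append, List.length_cons]; omega
    conv_rhs => rw [findSepB]
    rw [dif_pos h1]
    conv_lhs => rw [findSepB]
    rw [dif_pos h2, sepOk_shift]
    by_cases hs : sepOk r j = true
    · simp [hs]; omega
    · simp only [hs, Bool.false_eq_true, if_false]
      have h3 : a.length + 1 + j + 1 = a.length + 1 + (j + 1) := by omega
      rw [h3, ih (j + 1) (by omega)]

-- inside the leading '_'-free block (and at its failed start) the char test is false
theorem getD_mem_self (a : List Char) (k : Nat) (h : k < a.length) (d : Char) :
    a.getD k d ∈ a := by
  rw [List.getD_eq_getElem a d h]; exact List.getElem_mem h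

theorem getD_oob (a : List Char) (k : Nat) (h : a.length ≤ k) (d : Char) : a.getD k d = d := by
  simp [List.getD, List.getElem?_eq_none_iff.mpr h]

theorem sepOk_inside_false (a rest : List Char) (i : Nat) (ha : '_' ∉ a)
    (hrest : rest = [] ∨ ∃ r, rest = '_' :: r)
    (hnot : ¬ (PySem.Chars.strIsdigit a && a.length == 4) = true)
    (hi : i ≤ a.length) : sepOk (a ++ rest) i = false := by
  unfold sepOk
  cases i with
  | succ k =>
    -- 1 ≤ i ≤ a.length: the char left of i is inside a, hence not '_'
    have hk : k < a.length := by omega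
    have h2 : a.getD k ' ' ≠ '_' := fun he => ha (he ▸ getD_mem_self a k hk ' ')
    have hX : ((k + 1 : Nat) == 0 || (a ++ rest).getD (k + 1 - 1) ' ' == '_') = false := by
      rw [Nat.add_sub_cancel, List.getD_append a rest ' ' k hk]
      simp only [Bool.or_eq_false_iff, beq_eq_false_iff_ne]
      exact ⟨by omega, h2⟩
    rw [hX, Bool.false_and, Bool.false_and]
  | zero =>
    by_cases h4 : a.length = 4
    · -- take 4 = a itself: the digit test is exactly A's part test, which fails
      have ht : (a ++ rest).take 4 = a := by rw [← h4]; exact List.take_left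
      have hd : PySem.Chars.strIsdigit a = false := by
        cases hsd : PySem.Chars.strIsdigit a
        · rfl
        · exact absurd (by rw [hsd, h4]; simp) hnot
      have hY : PySem.Chars.strIsdigit (((a ++ rest).drop 0).take 4) = false := by
        rw [List.drop_zero, ht, hd]
      rw [hY, Bool.and_false, Bool.false_and]
    · rcases Nat.lt_or_ge a.length 4 with hlt | hgt
      · rcases hrest with rfl | ⟨r, rfl⟩
        · -- short '_'-free string: the right boundary fails (index 4 out of range, length ≠ 4)
          have hZ : ((0 + 4 : Nat) == (a ++ ([] : List Char)).length
              || (a ++ ([] : List Char)).getD (0 + 4) ' ' == '_') = false := by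
            simp only [Bool.or_eq_false_iff, beq_eq_false_iff_ne]
            constructor
            · simp; omega
            · rw [getD_oob _ _ (by simp; omega)]; decide
          rw [hZ, Bool.and_false]
        · -- '_' lands among the first four chars: the digit test fails
          have hmem : '_' ∈ (a ++ '_' :: r).take 4 := by
            rw [List.take_append]
            refine List.mem_append.mpr (Or.inr ?_)
            have h3 : 4 - a.length = (3 - a.length) + 1 := by omega
            rw [h3, List.take_succ_cons]
            exact List.mem_cons_self
          have hY : PySem.Chars.strIsdigit (((a ++ '_' :: r).drop 0).take 4) = false := by
            rw [List.drop_zero]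
            cases hsd : PySem.Chars.strIsdigit ((a ++ '_' :: r).take 4)
            · rfl
            · exfalso
              simp only [PySem.Chars.strIsdigit, Bool.and_eq_true, List.all_eq_true] at hsd
              have := hsd.2 '_' hmem
              exact absurd this (by decide)
          rw [hY, Bool.and_false, Bool.false_and]
      · -- a longer than 4: position 4 is inside a, so the right boundary fails
        have h2 : a.getD 4 ' ' ≠ '_' := fun he => ha (he ▸ getD_mem_self a 4 (by omega) ' ')
        have hZ : ((0 + 4 : Nat) == (a ++ rest).length
            || (a ++ rest).getD (0 + 4) ' ' == '_') = false := by
          simp only [Bool.or_eq_false_iff, beq_eq_false_iff_ne]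
          constructor
          · rcases hrest with rfl | ⟨r, rfl⟩ <;> simp <;> omega
          · rw [show (0 + 4 : Nat) = 4 by omega, List.getD_append a rest ' ' 4 (by omega)]
            exact h2
        rw [hZ, Bool.and_false]

theorem join_cons_ne_nil (a : List Char) (X : List (List Char)) (h : X ≠ []) :
    PySem.Chars.join [' '] (a :: X) = a ++ ' ' :: PySem.Chars.join [' '] X := by
  cases X with
  | nil => exact absurd rfl h
  | cons p ps => rw [PySem.Chars.join_cons_cons]; simp

-- the main correspondence between A's part search and B's char scan
theorem corr (n : Nat) (cs : List Char) (hn : cs.length ≤ n) :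
    match findSepA (splitU cs) 0, findSepB cs 0 with
    | none, none => True
    | some k, some i =>
        PySem.Chars.join [' '] ((splitU cs).take k) = (cs.take (i - 1)).map sub ∧
        PySem.Chars.join [' '] ((splitU cs).drop (k + 1)) = (cs.drop (i + 5)).map sub ∧
        (k = 0 ↔ i = 0)
    | _, _ => False := by
  induction n generalizing cs with
  | zero =>
    have hnil : cs = [] := List.eq_nil_of_length_eq_zero (by omega)
    subst hnil
    have hA : findSepA (splitU []) 0 = none := by decide
    have hB : findSepB [] 0 = none := findSepB_stop [] 0 (by simp)
    rw [hA, hB]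
    trivial
  | succ n ih =>
    -- split cs into its maximal '_'-free prefix a and the remainder rest
    obtain ⟨a, rest, hsplit, hnu, hrshape⟩ :
        ∃ a rest, cs = a ++ rest ∧ '_' ∉ a ∧ (rest = [] ∨ ∃ r, rest = '_' :: r) := by
      refine ⟨cs.takeWhile (fun x => x != '_'), cs.dropWhile (fun x => x != '_'),
        (List.takeWhile_append_dropWhile).symm, ?_, ?_⟩
      · intro hm
        have := List.mem_takeWhile_imp hm
        simp at this
      · cases hdw : cs.dropWhile (fun x => x != '_') with
        | nil => exact Or.inl rfl
        | cons d r =>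
          refine Or.inr ⟨r, ?_⟩
          have hne : cs.dropWhile (fun x => x != '_') ≠ [] := by rw [hdw]; simp
          have h2 := List.head_dropWhile_not (fun x => x != '_') hne
          have h3 : (cs.dropWhile (fun x => x != '_')).head hne = d := by simp [hdw]
          rw [h3] at h2
          have hd : d = '_' := by simpa using h2
          rw [hd]
    subst hsplit
    by_cases hdig : (PySem.Chars.strIsdigit a && a.length == 4) = true
    · -- the separator is the very first part / sits at char position 0
      have h4 : a.length = 4 := by
        have := (Bool.and_eq_true _ _).mp hdig
        simpa using this.2
      have hOk : sepOk (a ++ rest) 0 = true := by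
        unfold sepOk
        have hY : ((a ++ rest).drop 0).take 4 = a := by
          rw [List.drop_zero, ← h4]; exact List.take_left
        have hZ : ((0 + 4 : Nat) == (a ++ rest).length
            || (a ++ rest).getD (0 + 4) ' ' == '_') = true := by
          rcases hrshape with rfl | ⟨r, rfl⟩
          · simp [h4]
          · have hg : ((a ++ '_' :: r).getD (0 + 4) ' ' == '_') = true := by
              rw [show (0 + 4 : Nat) = a.length by omega, getD_at_sep]
              decide
            rw [hg, Bool.or_true]
        rw [hY, hZ]
        simp [(Bool.and_eq_true _ _).mp hdig |>.1]
      have hlt : 0 < (a ++ rest).length - 3 := by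
        rcases hrshape with rfl | ⟨r, rfl⟩
        · simp [h4]
        · simp [h4]
          omega
      have hB : findSepB (a ++ rest) 0 = some 0 := by
        rw [findSepB, dif_pos hlt, if_pos hOk]
      rcases hrshape with rfl | ⟨r, rfl⟩
      · have hsA : splitU (a ++ []) = [a] := by
          rw [List.append_nil]; exact splitU_no_sep a hnu
        have hA : findSepA [a] 0 = some 0 := by simp [findSepA, hdig]
        rw [hsA, hA, hB]
        refine ⟨by simp, ?_, by simp⟩
        simp [h4]
      · have hsA : splitU (a ++ '_' :: r) = a :: splitU r := splitU_append a r hnu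
        have hA : findSepA (a :: splitU r) 0 = some 0 := by simp [findSepA, hdig]
        rw [hsA, hA, hB]
        refine ⟨by simp, ?_, by simp⟩
        have hd5 : (a ++ '_' :: r).drop (0 + 5) = r := by
          have := drop_shift a r 0
          rw [show a.length + 1 + 0 = 0 + 5 by omega] at this
          simpa using this
        simpa [hd5] using join_splitU r
    · -- no separator inside a: A skips part a, B skips the first a.length+1 positions
      rcases hrshape with rfl | ⟨r, rfl⟩
      · -- whole string '_'-free and not a 4-digit run: neither side finds anything
        have hsA : splitU (a ++ []) = [a] := by
          rw [List.append_nil]; exact splitU_no_sep a hnu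
        have hA : findSepA [a] 0 = none := by simp [findSepA, hdig]
        have hB : findSepB (a ++ []) 0 = none := by
          rw [findSepB_skip _ 0 ((a ++ ([] : List Char)).length - 3) (by omega)
            (fun j _ hj => sepOk_inside_false a [] j hnu (Or.inl rfl) hdig (by simp at hj; omega))]
          exact findSepB_stop _ _ (by omega)
        rw [hsA, hA, hB]
        trivial
      · have hsA : splitU (a ++ '_' :: r) = a :: splitU r := splitU_append a r hnu
        have hA : findSepA (a :: splitU r) 0 = (findSepA (splitU r) 0).map (· + 1) := by
          simp only [findSepA, hdig, Bool.false_eq_true, if_false]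
          exact findSepA_shift (splitU r) 1
        have hB : findSepB (a ++ '_' :: r) 0
            = (findSepB r 0).map (· + (a.length + 1)) := by
          rw [findSepB_skip _ 0 (a.length + 1) (by omega)
            (fun j _ hj => sepOk_inside_false a ('_' :: r) j hnu (Or.inr ⟨r, rfl⟩) hdig (by omega))]
          simpa using findSepB_shift a r 0
        have hIH := ih r (by simp at hn; omega)
        rw [hsA, hA, hB]
        cases hA2 : findSepA (splitU r) 0 with
        | none =>
          cases hB2 : findSepB r 0 with
          | none => trivial
          | some i =>
            rw [hA2, hB2] at hIH
            exact hIH.elim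
        | some k =>
          cases hB2 : findSepB r 0 with
          | none =>
            rw [hA2, hB2] at hIH
            exact hIH.elim
          | some i =>
            rw [hA2, hB2] at hIH
            simp only [Option.map_some]
            obtain ⟨h1, h2, h3⟩ := hIH
            refine ⟨?_, ?_, by constructor <;> (intro h; omega)⟩
            · -- title clause
              have hidx : i + (a.length + 1) - 1 = a.length + i := by omega
              rw [List.take_succ_cons, hidx, List.take_length_add_append, List.map_append,
                map_sub_id a hnu]
              cases i with
              | zero =>
                have hk : k = 0 := h3.mpr rfl
                subst hk
                simp
              | succ i' =>
                have hk : k ≠ 0 := fun h => by omega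
                obtain ⟨k', rfl⟩ : ∃ k', k = k' + 1 := ⟨k - 1, by omega⟩
                have htk : (splitU r).take (k' + 1) ≠ [] := by
                  cases hsr : splitU r with
                  | nil => exact absurd hsr (splitU_ne_nil r)
                  | cons p ps => simp
                rw [join_cons_ne_nil _ _ htk, h1]
                have hi' : (i' + 1 - 1) = i' := by omega
                rw [hi', List.take_succ_cons, List.map_cons]
                simp [sub]
            · -- section clause
              rw [List.drop_succ_cons, h2]
              have hidx : i + (a.length + 1) + 5 = a.length + 1 + (i + 5) := by omega
              rw [hidx, drop_shift]

-- ===== VERDICT (by name: the statement is the Claim_ definition above) =====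
theorem extract_metadata_from_filename_spec : Claim_equal_extract_metadata_from_filename := by
  intro filename _
  unfold Spec_extract_metadata_from_filename
  unfold extract_metadata_from_filename extract_metadata_from_filename_alt
  dsimp only
  rw [splitOn_eq_splitU]
  set name := PySem.Chars.replace filename.toList ['.', 'p', 'd', 'f'] [] with hname
  have h := corr name.length name le_rfl
  cases hA : findSepA (splitU name) 0 <;> cases hB : findSepB name 0 <;>
    rw [hA, hB] at h
  · -- none / none
    rw [join_splitU, replace_eq_map]
  · exact absurd h (by simp)
  · exact absurd h (by simp)
  · rename_i k i
    obtain ⟨h1, h2, h3⟩ := h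
    simp only [replace_eq_map, h1, h2, map_sub_idem]
    by_cases hi : 0 < i
    · by_cases hl : i + 4 < name.length
      · simp [hi, hl]
      · have hnil : name.drop (i + 5) = [] := List.drop_eq_nil_of_le (by omega)
        simp [hi, hl, hnil, pyTitle, pyTitleGo]
    · have hi0 : i = 0 := by omega
      subst hi0
      have htk : name.take (0 - 1) = [] := by simp
      by_cases hl : 0 + 4 < name.length
      · simp [hl, pyTitle, pyTitleGo]
      · have hnil : name.drop (0 + 5) = [] := List.drop_eq_nil_of_le (by omega)
        simp [hl, hnil, pyTitle, pyTitleGo]
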